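-- pv_equiv track=rewrite | github.com/kevinxu993/DNA-Sequencing | a1.py | zip_length
-- ===== SOURCE A (Python) =====
-- def zip_length(gene3):
--     '''(str) -> int
--     Takes in a string representing a gene, and returns the maximum number of
--     nucleotide pairs that this gene can zip. Zipping happens when the
--     nucleotides at either end of a gene form a pair bond, which may in turn
--     allow the next nucleotides in from those genes to bond. This process
--     continues until a pair of nucleotides do not form a bond.
--     REQ: The input should be a string representing genes.
--     >>> zip_length('AGTCTCGCT')
--     2
--     >>> zip_length('TCAGTACTGA')
--     5
--     >>> zip_length('TCAGTACTGC')
--     0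
--     '''
--     # create a integer for counting pairs
--     l = 0
--     # check the pairs in the gene
--     half = int(len(gene3)/2)
--     for i in range(half):
--         back = -1-i
--         if (gene3[i] == 'G') and (gene3[back] == 'C'):
--             l = l + 1
--         elif (gene3[i] == 'C') and (gene3[back] == 'G'):
--             l = l + 1
--         elif (gene3[i] == 'A') and (gene3[back] == 'T'):
--             l = l + 1
--         elif (gene3[i] == 'T') and (gene3[back] == 'A'):
--             l = l + 1
--         # if cannot pair, return the number found immediately
--         else:
--             return l
--     # return the zip length
--     return l
-- ===== SOURCE B (Python) =====
-- def zip_length(gene3):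
--     # Recursive decomposition: peel the outer pair; if it bonds, the answer is
--     # 1 + the zip length of the string with both ends removed, else 0.
--     if len(gene3) < 2:
--         return 0
--     if gene3[0] + gene3[-1] in ('GC', 'CG', 'AT', 'TA'):
--         return 1 + zip_length(gene3[1:-1])
--     return 0
-- ===== Notes on version B (the rewrite author's own statement) =====
-- stated objective: alternative
-- what changed: Replaces A's indexed for-loop over range(len//2) with negative back-indexing and a four-branch if/elif chain by a recursion on the string itself: peel the outer character pair, test it by membership in the tuple of bonding pairs, and recurse on the slice with both ends removed (the len<2 base case makes the len//2 bound implicit).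
import Mathlib
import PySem

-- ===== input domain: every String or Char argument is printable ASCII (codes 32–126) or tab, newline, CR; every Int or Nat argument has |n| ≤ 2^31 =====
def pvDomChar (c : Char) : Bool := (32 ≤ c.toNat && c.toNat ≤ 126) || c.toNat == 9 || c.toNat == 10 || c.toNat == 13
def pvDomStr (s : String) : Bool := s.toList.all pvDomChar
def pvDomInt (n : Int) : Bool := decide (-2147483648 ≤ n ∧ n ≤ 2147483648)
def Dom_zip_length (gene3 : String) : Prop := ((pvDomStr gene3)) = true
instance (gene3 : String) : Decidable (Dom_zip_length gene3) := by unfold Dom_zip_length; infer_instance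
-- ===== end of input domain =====

-- B replaces A's indexed loop (range(len//2), negative back index, four-branch if/elif with early
-- return) by a recursion on the string itself: peel the outer pair, test it by tuple membership,
-- recurse on the slice with both ends removed. Alternative decomposition, same results.

-- ===== PORT A =====
-- the for-loop over range(half) with early return, as structural recursion over the range list;
-- the indices are always in range, so pyGet? is always `some` here
def zip_length_loop (g : List Char) (l : Int) : List Int → Int
  | [] => l
  | i :: rest =>
    let back := -1 - i
    if PySem.List.pyGet? g i = some 'G' ∧ PySem.List.pyGet? g back = some 'C' then
      zip_length_loop g (l + 1) rest
    else if PySem.List.pyGet? g i = some 'C' ∧ PySem.List.pyGet? g back = some 'G' then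
      zip_length_loop g (l + 1) rest
    else if PySem.List.pyGet? g i = some 'A' ∧ PySem.List.pyGet? g back = some 'T' then
      zip_length_loop g (l + 1) rest
    else if PySem.List.pyGet? g i = some 'T' ∧ PySem.List.pyGet? g back = some 'A' then
      zip_length_loop g (l + 1) rest
    else l

def zip_length (gene3 : String) : Int :=
  let g := gene3.toList
  let half : Nat := g.length / 2   -- int(len(gene3)/2)
  zip_length_loop g 0 (PySem.List.pyRange 0 (half : Int) 1)

-- ===== PORT B =====
-- the recursion of Source B: gene3[0] and gene3[-1] never raise under the len ≥ 2 guard, and on a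
-- string of length ≥ 2 the slice gene3[1:-1] is exactly tail.dropLast
def zip_length_alt_rec (L : List Char) : Int :=
  if h : L.length < 2 then 0
  else
    if String.ofList [L[0]'(by omega), L[L.length - 1]'(by omega)]
        ∈ (["GC", "CG", "AT", "TA"] : List String)
    then 1 + zip_length_alt_rec (L.tail.dropLast)
    else 0
termination_by L.length
decreasing_by simp [List.length_dropLast, List.length_tail]; omega

def zip_length_alt (gene3 : String) : Int := zip_length_alt_rec gene3.toList

-- ===== PRECONDITION & SPEC =====
def Spec_zip_length (gene3 : String) (out : Int) : Prop := out = zip_length_alt gene3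
instance (gene3 : String) (out : Int) : Decidable (Spec_zip_length gene3 out) := by unfold Spec_zip_length; infer_instance

-- ===== CLAIM (what is proved, stated in full; the proofs are below) =====
def Claim_equal_zip_length : Prop := ∀ (gene3 : String), Dom_zip_length gene3 → Spec_zip_length gene3 (zip_length gene3)

-- ===== LEMMAS AND PROOFS =====

-- the accumulator of A's loop only adds to its result
lemma zl_loop_add (g : List Char) : ∀ (r : List Int) (l : Int),
    zip_length_loop g l r = l + zip_length_loop g 0 r := by
  intro r
  induction r with
  | nil => intro l; simp [zip_length_loop]
  | cons i rest ih =>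
    intro l
    simp only [zip_length_loop]
    split_ifs <;> first
      | (rw [ih (l + 1), ih (0 + 1)]; ring)
      | ring

-- one iteration of A's loop, with the two lookups resolved
lemma zl_loop_step (g : List Char) (l : Int) (i : Int) (rest : List Int) (a b : Char)
    (h1 : PySem.List.pyGet? g i = some a) (h2 : PySem.List.pyGet? g (-1 - i) = some b) :
    zip_length_loop g l (i :: rest) =
      if (a = 'G' ∧ b = 'C') ∨ (a = 'C' ∧ b = 'G') ∨ (a = 'A' ∧ b = 'T') ∨ (a = 'T' ∧ b = 'A')
      then zip_length_loop g (l + 1) rest else l := by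
  by_cases H : (a = 'G' ∧ b = 'C') ∨ (a = 'C' ∧ b = 'G') ∨ (a = 'A' ∧ b = 'T') ∨ (a = 'T' ∧ b = 'A')
  · rw [if_pos H]
    rcases H with ⟨rfl, rfl⟩ | ⟨rfl, rfl⟩ | ⟨rfl, rfl⟩ | ⟨rfl, rfl⟩ <;>
      simp [zip_length_loop, h1, h2]
  · rw [if_neg H]
    push Not at H
    obtain ⟨p1, p2, p3, p4⟩ := H
    simp only [zip_length_loop, h1, h2, Option.some.injEq]
    rw [if_neg (by rintro ⟨x, y⟩; exact (p1 x) y), if_neg (by rintro ⟨x, y⟩; exact (p2 x) y),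
      if_neg (by rintro ⟨x, y⟩; exact (p3 x) y), if_neg (by rintro ⟨x, y⟩; exact (p4 x) y)]

-- B's tuple-membership test, characterised on the two characters
lemma zl_pair_mem_iff (a b : Char) :
    (String.ofList [a, b] ∈ (["GC", "CG", "AT", "TA"] : List String)) ↔
      ((a = 'G' ∧ b = 'C') ∨ (a = 'C' ∧ b = 'G') ∨ (a = 'A' ∧ b = 'T') ∨ (a = 'T' ∧ b = 'A')) := by
  have h : ∀ (c d : Char), String.ofList [a, b] = String.ofList [c, d] ↔ (a = c ∧ b = d) := by
    intro c d
    constructor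
    · intro h
      have := congrArg String.toList h
      simp at this
      exact this
    · rintro ⟨rfl, rfl⟩; rfl
  simp only [List.mem_cons, List.not_mem_nil, or_false]
  rw [show ("GC" : String) = String.ofList ['G', 'C'] from rfl,
      show ("CG" : String) = String.ofList ['C', 'G'] from rfl,
      show ("AT" : String) = String.ofList ['A', 'T'] from rfl,
      show ("TA" : String) = String.ofList ['T', 'A'] from rfl,
      h, h, h, h]

-- running A's loop from index j+1 on L is running it from index j on L with both ends removed
lemma zl_shift (L : List Char) (hn : 2 ≤ L.length) :
    ∀ (c j : Nat) (l : Int), c = (L.length - 2) / 2 - j → j ≤ (L.length - 2) / 2 →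
      zip_length_loop L l (PySem.List.pyRange ((j + 1 : Nat) : Int) ((L.length / 2 : Nat) : Int) 1)
        = zip_length_loop (L.tail.dropLast) l
            (PySem.List.pyRange ((j : Nat) : Int) (((L.length - 2) / 2 : Nat) : Int) 1) := by
  intro c
  induction c with
  | zero =>
    intro j l hc hj
    have hj' : j = (L.length - 2) / 2 := by omega
    have h2 : L.length / 2 = (L.length - 2) / 2 + 1 := by omega
    rw [PySem.List.pyRange_one_eq_nil (by push_cast; omega),
        PySem.List.pyRange_one_eq_nil (by push_cast; omega)]
    rfl
  | succ c ih =>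
    intro j l hc hj
    have hjlt : j < (L.length - 2) / 2 := by omega
    have h2 : L.length / 2 = (L.length - 2) / 2 + 1 := by omega
    have hmlen : (L.tail.dropLast).length = L.length - 2 := by
      rw [List.length_dropLast, List.length_tail]; omega
    have hj1 : j + 1 < L.length := by omega
    have hback : L.length - (j + 2) < L.length := by omega
    have hjm : j < (L.tail.dropLast).length := by omega
    have hg1 : PySem.List.pyGet? L ((j + 1 : Nat) : Int) = some (L[j + 1]'hj1) := by
      rw [PySem.List.pyGet?_natCast, List.getElem?_eq_getElem hj1]
    have hg2 : PySem.List.pyGet? L (-1 - ((j + 1 : Nat) : Int))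
        = some (L[L.length - (j + 2)]'hback) := by
      have he : (-1 - ((j + 1 : Nat) : Int)) = -(((j + 2 : Nat) : Int)) := by push_cast; ring
      have hneg := PySem.List.pyGet?_neg_natCast L (j + 2) (by omega) (by omega)
      rw [he, hneg, List.getElem?_eq_getElem hback]
    have hm1 : PySem.List.pyGet? (L.tail.dropLast) ((j : Nat) : Int)
        = some (L[j + 1]'hj1) := by
      rw [PySem.List.pyGet?_natCast, List.getElem?_eq_getElem hjm]
      congr 1
      rw [List.getElem_dropLast, List.getElem_tail]
    have hm2 : PySem.List.pyGet? (L.tail.dropLast) (-1 - ((j : Nat) : Int))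
        = some (L[L.length - (j + 2)]'hback) := by
      have he : (-1 - ((j : Nat) : Int)) = -(((j + 1 : Nat) : Int)) := by push_cast; ring
      have hlt : (L.tail.dropLast).length - (j + 1) < (L.tail.dropLast).length := by omega
      have hneg := PySem.List.pyGet?_neg_natCast (L.tail.dropLast) (j + 1) (by omega) (by omega)
      rw [he, hneg, List.getElem?_eq_getElem hlt]
      congr 1
      rw [List.getElem_dropLast, List.getElem_tail]
      congr 1
      omega
    rw [PySem.List.pyRange_one_cons (a := ((j : Nat) : Int))
          (b := (((L.length - 2) / 2 : Nat) : Int)) (by push_cast; omega),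
        PySem.List.pyRange_one_cons (a := ((j + 1 : Nat) : Int))
          (b := ((L.length / 2 : Nat) : Int)) (by push_cast; omega)]
    rw [zl_loop_step _ _ _ _ _ _ hg1 hg2, zl_loop_step _ _ _ _ _ _ hm1 hm2]
    have e1 : ((j + 1 : Nat) : Int) + 1 = ((j + 1 + 1 : Nat) : Int) := by push_cast; ring
    have e2 : ((j : Nat) : Int) + 1 = ((j + 1 : Nat) : Int) := by push_cast; ring
    rw [e1, e2]
    split_ifs
    · exact ih (j + 1) (l + 1) (by omega) (by omega)
    · rfl

-- A's loop on the whole range equals B's recursion, by strong induction on the length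
lemma zl_main : ∀ (n : Nat) (L : List Char), L.length = n →
    zip_length_loop L 0 (PySem.List.pyRange 0 ((L.length / 2 : Nat) : Int) 1)
      = zip_length_alt_rec L := by
  intro n
  induction n using Nat.strong_induction_on with
  | _ n ih =>
    intro L hL
    by_cases hsmall : L.length < 2
    · have h0 : L.length / 2 = 0 := by omega
      rw [h0, zip_length_alt_rec]
      simp [hsmall, PySem.List.pyRange_one_eq_nil (by norm_num : (0 : Int) ≤ 0), zip_length_loop]
    · push Not at hsmall
      have h0 : 0 < L.length := by omega
      have hlast : L.length - 1 < L.length := by omega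
      have hhalf : 1 ≤ L.length / 2 := by omega
      have hmid : (L.tail.dropLast).length = L.length - 2 := by
        rw [List.length_dropLast, List.length_tail]; omega
      have hg1 : PySem.List.pyGet? L (0 : Int) = some (L[0]'h0) := by
        have : (0 : Int) = ((0 : Nat) : Int) := rfl
        rw [this, PySem.List.pyGet?_natCast, List.getElem?_eq_getElem h0]
      have hg2 : PySem.List.pyGet? L (-1 - (0 : Int)) = some (L[L.length - 1]'hlast) := by
        have he : (-1 - (0 : Int)) = -(((1 : Nat) : Int)) := by norm_num
        have hneg := PySem.List.pyGet?_neg_natCast L 1 (by omega) (by omega)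
        rw [he, hneg, List.getElem?_eq_getElem hlast]
      have hrec : zip_length_loop L 0 (PySem.List.pyRange ((1 : Nat) : Int) ((L.length / 2 : Nat) : Int) 1)
          = zip_length_alt_rec (L.tail.dropLast) := by
        have hsh := zl_shift L hsmall ((L.length - 2) / 2) 0 0 (by omega) (by omega)
        have e4 : ((0 + 1 : Nat) : Int) = ((1 : Nat) : Int) := by norm_num
        have e5 : ((0 : Nat) : Int) = 0 := rfl
        rw [e4, e5] at hsh
        rw [hsh, ← hmid]
        exact ih _ (by omega) _ rfl
      rw [PySem.List.pyRange_one_cons (a := (0 : Int))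
            (b := ((L.length / 2 : Nat) : Int)) (by push_cast; omega)]
      rw [zl_loop_step _ _ _ _ _ _ hg1 hg2]
      rw [zip_length_alt_rec]
      simp only [dif_neg (by omega : ¬ L.length < 2)]
      by_cases hb : String.ofList [L[0]'h0, L[L.length - 1]'hlast]
          ∈ (["GC", "CG", "AT", "TA"] : List String)
      · rw [if_pos hb, if_pos ((zl_pair_mem_iff _ _).mp hb)]
        have e6 : (0 : Int) + 1 = ((1 : Nat) : Int) := by norm_num
        rw [e6, zl_loop_add, hrec]
        norm_num
      · rw [if_neg hb, if_neg (fun h => hb ((zl_pair_mem_iff _ _).mpr h))]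

-- ===== VERDICT (by name: the statement is the Claim_ definition above) =====
theorem zip_length_spec : Claim_equal_zip_length := by
  intro gene3 _
  unfold Spec_zip_length zip_length zip_length_alt
  exact zl_main gene3.toList.length gene3.toList rfl
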